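-- pv_equiv track=rewrite | github.com/Kim-Somme-Taeuk/plana-ai | collector/capture_import.py | _resolve_anchor_ranks
-- ===== SOURCE A (Python) =====
-- def _resolve_anchor_ranks(detected_ranks: list[int | None]) -> list[int]:
--     if not detected_ranks:
--         return []
--
--     ranks = list(detected_ranks)
--     seen: set[int] = set()
--     for index, rank in enumerate(ranks):
--         if rank is None or rank <= 0 or rank in seen:
--             ranks[index] = None
--             continue
--         seen.add(rank)
--
--     ranks = _drop_inconsistent_detected_ranks(ranks)
--
--     known_indices = [index for index, rank in enumerate(ranks) if rank is not None]
--     if not known_indices: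
--         return [index + 1 for index in range(len(ranks))]
--
--     first_index = known_indices[0]
--     first_rank = ranks[first_index]
--     assert first_rank is not None
--     for index in range(first_index - 1, -1, -1):
--         ranks[index] = max(1, first_rank - (first_index - index))
--
--     for known_pos, start_index in enumerate(known_indices[:-1]):
--         end_index = known_indices[known_pos + 1]
--         start_rank = ranks[start_index]
--         assert start_rank is not None
--         for index in range(start_index + 1, end_index):
--             ranks[index] = start_rank + (index - start_index)
--
--     last_index = known_indices[-1]
--     last_rank = ranks[last_index]
--     assert last_rank is not None
--     for index in range(last_index + 1, len(ranks)):
--         ranks[index] = last_rank + (index - last_index)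
--
--     resolved: list[int] = []
--     for index, rank in enumerate(ranks):
--         if rank is None:
--             if resolved:
--                 rank = resolved[-1] + 1
--             else:
--                 rank = index + 1
--         resolved.append(rank)
--     return resolved
--
-- def _drop_inconsistent_detected_ranks(ranks: list[int | None]) -> list[int | None]:
--     known = [(index, rank) for index, rank in enumerate(ranks) if rank is not None]
--     if len(known) <= 1:
--         return ranks
--
--     def support(anchor_index: int, anchor_rank: int) -> int:
--         count = 0
--         for index, rank in known:
--             assert rank is not None
--             expected = anchor_rank + (index - anchor_index)
--             if abs(rank - expected) <= 1:
--                 count += 1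
--         return count
--
--     supports = {
--         (index, rank): support(index, rank)
--         for index, rank in known
--     }
--     best_support = max(supports.values())
--     supported_known = [
--         (index, rank)
--         for index, rank in known
--         if supports[(index, rank)] == best_support
--     ]
--
--     large_rank_candidates = [
--         item
--         for item in supported_known
--         if item[1] >= 1000
--     ]
--     if large_rank_candidates:
--         best_anchor_index, best_anchor_rank = max(
--             large_rank_candidates,
--             key=lambda item: (item[1], -item[0]),
--         )
--     else:
--         best_anchor_index, best_anchor_rank = min(
--             supported_known,
--             key=lambda item: (item[0], item[1]),
--         )
--
--     filtered = list(ranks)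
--     for index, rank in known:
--         assert rank is not None
--         expected = best_anchor_rank + (index - best_anchor_index)
--         if abs(rank - expected) > 1:
--             filtered[index] = None
--     return filtered
-- ===== SOURCE B (Python) =====
-- def _resolve_anchor_ranks(detected_ranks):
--     if not detected_ranks:
--         return []
--     n = len(detected_ranks)
--
--     # single pass: keep first occurrence of each positive rank, as (index, rank) pairs
--     seen = set()
--     known = []
--     for i, r in enumerate(detected_ranks):
--         if r is not None and r > 0 and r not in seen:
--             seen.add(r)
--             known.append((i, r))
--
--     if len(known) > 1:
--         # support counted via a frequency table on offsets d = rank - index: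
--         # support(i, r) = freq[d-1] + freq[d] + freq[d+1], O(k) total
--         freq = {}
--         for i, r in known:
--             d = r - i
--             freq[d] = freq.get(d, 0) + 1
--
--         def supp(i, r):
--             d = r - i
--             return freq.get(d - 1, 0) + freq.get(d, 0) + freq.get(d + 1, 0)
--
--         best = max(supp(i, r) for i, r in known)
--         supported = [(i, r) for i, r in known if supp(i, r) == best]
--         large = [(i, r) for i, r in supported if r >= 1000]
--         if large:
--             ai, ar = max(large, key=lambda t: (t[1], -t[0]))
--         else:
--             # indices are strictly increasing, so min by (index, rank) is the head
--             ai, ar = supported[0]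
--         d0 = ar - ai
--         known = [(i, r) for i, r in known if abs(r - (d0 + i)) <= 1]
--
--     if not known:
--         return list(range(1, n + 1))
--
--     # one forward pass: before the first anchor extrapolate backwards (clamped at 1),
--     # from it on extrapolate from the latest anchor at or before i
--     f, fr = known[0]
--     cur = known[0]
--     nxt = known[1:]
--     res = []
--     for i in range(n):
--         if i < f:
--             res.append(max(1, fr - (f - i)))
--         else:
--             if nxt and nxt[0][0] == i:
--                 cur = nxt[0]
--                 nxt = nxt[1:]
--             res.append(cur[1] + (i - cur[0]))
--     return res
-- ===== Notes on version B (the rewrite author's own statement) =====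
-- stated objective: faster
-- what changed: Anchor support is computed from a frequency table over offsets d = rank - index (support = freq[d-1]+freq[d]+freq[d+1]) instead of an O(k^2) pairwise scan, the first-occurrence filtering and known-pair extraction are fused into one pass, and the rank filling is a single forward pass carrying the current anchor instead of three index-mutation loops plus a rebuild pass.
import Mathlib
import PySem

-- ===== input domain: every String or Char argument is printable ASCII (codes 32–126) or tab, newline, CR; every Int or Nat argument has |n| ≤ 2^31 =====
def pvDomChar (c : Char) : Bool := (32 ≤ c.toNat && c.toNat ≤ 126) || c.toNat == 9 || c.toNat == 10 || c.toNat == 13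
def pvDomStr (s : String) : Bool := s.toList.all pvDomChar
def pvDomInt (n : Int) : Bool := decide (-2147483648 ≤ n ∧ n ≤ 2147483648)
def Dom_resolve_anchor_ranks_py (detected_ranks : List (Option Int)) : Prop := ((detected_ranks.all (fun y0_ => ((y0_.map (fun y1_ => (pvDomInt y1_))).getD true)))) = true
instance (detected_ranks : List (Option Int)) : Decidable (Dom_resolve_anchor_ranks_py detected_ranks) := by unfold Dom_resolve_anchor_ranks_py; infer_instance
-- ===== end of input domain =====

-- B replaces A's O(k^2) pairwise support scan by a frequency table over offsets rank-index
-- and fills the ranks in one forward pass; return values are proved identical on all inputs.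

-- ===== PORT A =====

-- first pass of A: None out non-positive and repeated ranks (in-place set)
def pvA_dedup (detected_ranks : List (Option Int)) : PySem.Set Int × List (Option Int) :=
  (PySem.List.enumerate detected_ranks 0).foldl
    (fun st p =>
      match p.2 with
      | none => (st.1, PySem.List.pySetD st.2 p.1 none)
      | some r =>
        if r ≤ 0 ∨ st.1.contains r then (st.1, PySem.List.pySetD st.2 p.1 none)
        else (st.1.add r, st.2))
    (PySem.Set.empty, detected_ranks)

-- _drop_inconsistent_detected_ranks.support
def pvA_support (known : List (Int × Int)) (anchor_index anchor_rank : Int) : Int :=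
  known.foldl (fun count q =>
    if |q.2 - (anchor_rank + (q.1 - anchor_index))| ≤ 1 then count + 1 else count) 0

-- _drop_inconsistent_detected_ranks
def pvA_drop (ranks : List (Option Int)) : List (Option Int) :=
  let known := (PySem.List.enumerate ranks 0).foldl
      (fun acc p => match p.2 with | some r => acc ++ [(p.1, r)] | none => acc) []
  if known.length ≤ 1 then ranks
  else
    let supports : PySem.Dict (Int × Int) Int :=
      known.foldl (fun d p => d.insert p (pvA_support known p.1 p.2)) PySem.Dict.empty
    let best_support := (PySem.List.max? supports.values (fun y => y)).getD 0
    let supported_known := known.filter (fun p => supports.getD p 0 == best_support)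
    let large := supported_known.filter (fun p => 1000 ≤ p.2)
    let best := if large ≠ [] then
        (PySem.List.max2? large (fun p => p.2) (fun p => -p.1)).getD (0, 0)
      else
        (PySem.List.min2? supported_known (fun p => p.1) (fun p => p.2)).getD (0, 0)
    known.foldl (fun rs p =>
      if 1 < |p.2 - (best.2 + (p.1 - best.1))| then PySem.List.pySetD rs p.1 none else rs) ranks

-- second half of A: extrapolate around the known anchors (the three index loops
-- and the final rebuild loop), verbatim
def pvA_fill (ranks : List (Option Int)) : List Int :=
  let known_indices := (PySem.List.enumerate ranks 0).foldl
      (fun acc p => if p.2.isSome then acc ++ [p.1] else acc) []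
  if known_indices = [] then (PySem.List.pyRange 0 ranks.length 1).map (fun i => i + 1)
  else
    let first_index := PySem.List.pyGetD known_indices 0 0
    -- assert first_rank is not None: value is always present, extracted with getD
    let first_rank := (PySem.List.pyGetD ranks first_index none).getD 0
    let ranks2 := (PySem.List.pyRange (first_index - 1) (-1) (-1)).foldl
        (fun rs i => PySem.List.pySetD rs i (some (max 1 (first_rank - (first_index - i))))) ranks
    let ranks3 := (PySem.List.enumerate known_indices.dropLast 0).foldl
        (fun rs p =>
          let end_index := PySem.List.pyGetD known_indices (p.1 + 1) 0
          let start_rank := (PySem.List.pyGetD rs p.2 none).getD 0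
          (PySem.List.pyRange (p.2 + 1) end_index 1).foldl
            (fun rs2 i => PySem.List.pySetD rs2 i (some (start_rank + (i - p.2)))) rs)
        ranks2
    let last_index := PySem.List.pyGetD known_indices (-1) 0
    let last_rank := (PySem.List.pyGetD ranks3 last_index none).getD 0
    let ranks4 := (PySem.List.pyRange (last_index + 1) ranks3.length 1).foldl
        (fun rs i => PySem.List.pySetD rs i (some (last_rank + (i - last_index)))) ranks3
    (PySem.List.enumerate ranks4 0).foldl
      (fun res p =>
        match p.2 with
        | some r => res ++ [r]
        | none => res ++ [if res = [] then p.1 + 1 else PySem.List.pyGetD res (-1) 0 + 1]) []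

def resolve_anchor_ranks_py (detected_ranks : List (Option Int)) : List Int :=
  if detected_ranks = [] then []
  else pvA_fill (pvA_drop (pvA_dedup detected_ranks).2)

-- ===== PORT B =====

-- one pass: (index, rank) pairs of first occurrences of positive ranks
def pvB_known (detected_ranks : List (Option Int)) : List (Int × Int) :=
  ((PySem.List.enumerate detected_ranks 0).foldl
    (fun (st : PySem.Set Int × List (Int × Int)) p =>
      match p.2 with
      | some r => if 0 < r ∧ ¬ st.1.contains r then (st.1.add r, st.2 ++ [(p.1, r)]) else st
      | none => st)
    (PySem.Set.empty, [])).2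

-- support from the offset frequency table
def pvB_supp (freq : PySem.Dict Int Int) (d : Int) : Int :=
  freq.getD (d - 1) 0 + freq.getD d 0 + freq.getD (d + 1) 0

def pvB_filterKnown (known : List (Int × Int)) : List (Int × Int) :=
  if known.length ≤ 1 then known
  else
    let freq := known.foldl
        (fun d p => d.insert (p.2 - p.1) (d.getD (p.2 - p.1) 0 + 1)) PySem.Dict.empty
    let best := (PySem.List.max? (known.map (fun p => pvB_supp freq (p.2 - p.1))) (fun y => y)).getD 0
    let supported := known.filter (fun p => pvB_supp freq (p.2 - p.1) == best)
    let large := supported.filter (fun p => 1000 ≤ p.2)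
    let a := if large ≠ [] then
        (PySem.List.max2? large (fun p => p.2) (fun p => -p.1)).getD (0, 0)
      else supported.headD (0, 0)   -- supported[0]: indices strictly increase, min by (index, rank) is the head
    known.filter (fun p => |p.2 - ((a.2 - a.1) + p.1)| ≤ 1)

-- B's single forward fill pass, carrying (current anchor, remaining anchors)
def pvB_fill (n : Int) (c0 : Int × Int) (rest : List (Int × Int)) : List Int :=
  ((PySem.List.pyRange 0 n 1).foldl
    (fun (st : List Int × (Int × Int) × List (Int × Int)) j =>
      if j < c0.1 then (st.1 ++ [max 1 (c0.2 - (c0.1 - j))], st.2)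
      else
        match st.2.2 with
        | q :: rest' =>
          if q.1 = j then (st.1 ++ [q.2 + (j - q.1)], q, rest')
          else (st.1 ++ [st.2.1.2 + (j - st.2.1.1)], st.2)
        | [] => (st.1 ++ [st.2.1.2 + (j - st.2.1.1)], st.2))
    ([], c0, rest)).1

def resolve_anchor_ranks_py_alt (detected_ranks : List (Option Int)) : List Int :=
  if detected_ranks = [] then []
  else
    match pvB_filterKnown (pvB_known detected_ranks) with
    | [] => PySem.List.pyRange 1 (detected_ranks.length + 1) 1
    | c0 :: rest => pvB_fill detected_ranks.length c0 rest

-- ===== PRECONDITION & SPEC =====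
def Spec_resolve_anchor_ranks_py (detected_ranks : List (Option Int)) (out : List Int) : Prop := out = resolve_anchor_ranks_py_alt detected_ranks
instance (detected_ranks : List (Option Int)) (out : List Int) : Decidable (Spec_resolve_anchor_ranks_py detected_ranks out) := by unfold Spec_resolve_anchor_ranks_py; infer_instance

-- ===== CLAIM (what is proved, stated in full; the proofs are below) =====
def Claim_equal_resolve_anchor_ranks_py : Prop := ∀ (detected_ranks : List (Option Int)), Dom_resolve_anchor_ranks_py detected_ranks → Spec_resolve_anchor_ranks_py detected_ranks (resolve_anchor_ranks_py detected_ranks)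

-- ===== LEMMAS AND PROOFS =====

-- pure middlemen (proof-only)
def pvDedup (seen : PySem.Set Int) : List (Option Int) → PySem.Set Int × List (Option Int)
  | [] => (seen, [])
  | none :: t => ((pvDedup seen t).1, none :: (pvDedup seen t).2)
  | some v :: t =>
    if v ≤ 0 ∨ seen.contains v then ((pvDedup seen t).1, none :: (pvDedup seen t).2)
    else ((pvDedup (seen.add v) t).1, some v :: (pvDedup (seen.add v) t).2)

def pvKp (seen : PySem.Set Int) (s : Int) : List (Option Int) → List (Int × Int)
  | [] => []
  | none :: t => pvKp seen (s+1) t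
  | some v :: t => if v ≤ 0 ∨ seen.contains v then pvKp seen (s+1) t
      else (s, v) :: pvKp (seen.add v) (s+1) t

def pvAll (s : Int) : List (Option Int) → List (Int × Int)
  | [] => []
  | none :: t => pvAll (s+1) t
  | some v :: t => (s, v) :: pvAll (s+1) t

def pvDropF (a : Int × Int) (s : Int) : List (Option Int) → List (Option Int)
  | [] => []
  | none :: t => none :: pvDropF a (s+1) t
  | some v :: t =>
      (if 1 < |v - (a.2 + (s - a.1))| then none else some v) :: pvDropF a (s+1) t

def pvAnchor (cur : Int × Int) (l : List (Int × Int)) (i : Int) : Int × Int :=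
  match l with
  | [] => cur
  | q :: t => if q.1 ≤ i then pvAnchor q t i else cur

def pvBest (known : List (Int × Int)) : Int × Int :=
  let freq := known.foldl
      (fun d p => d.insert (p.2 - p.1) (d.getD (p.2 - p.1) 0 + 1)) PySem.Dict.empty
  let best := (PySem.List.max? (known.map (fun p => pvB_supp freq (p.2 - p.1))) (fun y => y)).getD 0
  let supported := known.filter (fun p => pvB_supp freq (p.2 - p.1) == best)
  let large := supported.filter (fun p => 1000 ≤ p.2)
  if large ≠ [] then
    (PySem.List.max2? large (fun p => p.2) (fun p => -p.1)).getD (0, 0)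
  else supported.headD (0, 0)

def pvSpec (c0 : Int × Int) (rest : List (Int × Int)) (j : Int) : Int :=
  if j < c0.1 then max 1 (c0.2 - (c0.1 - j))
  else (pvAnchor c0 rest j).2 + (j - (pvAnchor c0 rest j).1)

-- dedup pass = pvDedup
lemma pvA_dedup_go : ∀ (l pre : List (Option Int)) (seen : PySem.Set Int),
    (PySem.List.enumerate l (pre.length : Int)).foldl
      (fun st p =>
        match p.2 with
        | none => (st.1, PySem.List.pySetD st.2 p.1 none)
        | some r =>
          if r ≤ 0 ∨ st.1.contains r then (st.1, PySem.List.pySetD st.2 p.1 none)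
          else (st.1.add r, st.2))
      (seen, pre ++ l)
    = ((pvDedup seen l).1, pre ++ (pvDedup seen l).2) := by
  intro l
  induction l with
  | nil => intro pre seen; simp [pvDedup, PySem.List.enumerate_nil]
  | cons x t ih =>
    intro pre seen
    rw [PySem.List.enumerate_cons, List.foldl_cons]
    match x with
    | none =>
      have hset : PySem.List.pySetD (pre ++ none :: t) (pre.length : Int) none = pre ++ none :: t := by simp
      have h1 : ((pre.length : Int) + 1) = (((pre ++ [(none : Option Int)]).length : Int)) := by simp
      simp only [hset]
      have := ih (pre ++ [(none : Option Int)]) seen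
      rw [List.append_assoc] at this
      simp only [h1]
      simp only [List.append_assoc, List.singleton_append] at this ⊢
      rw [this]
      simp [pvDedup]
    | some v =>
      by_cases hc : v ≤ 0 ∨ seen.contains v
      · have hset : PySem.List.pySetD (pre ++ some v :: t) (pre.length : Int) none = pre ++ none :: t := by simp
        have h1 : ((pre.length : Int) + 1) = (((pre ++ [(none : Option Int)]).length : Int)) := by simp
        simp only [if_pos hc, hset]
        have := ih (pre ++ [(none : Option Int)]) seen
        simp only [List.append_assoc, List.singleton_append] at this ⊢
        rw [h1, this]
        have hc' : v ≤ 0 ∨ v ∈ seen := by simpa using hc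
        simp [pvDedup, hc']
      · have h1 : ((pre.length : Int) + 1) = (((pre ++ [some v]).length : Int)) := by simp
        simp only [if_neg hc]
        have := ih (pre ++ [some v]) (seen.add v)
        simp only [List.append_assoc, List.singleton_append] at this ⊢
        rw [h1, this]
        have hc' : ¬ (v ≤ 0 ∨ v ∈ seen) := by simpa using hc
        simp [pvDedup, hc']


lemma pvA_dedup_eq (l : List (Option Int)) : pvA_dedup l = pvDedup PySem.Set.empty l := by
  have := pvA_dedup_go l [] PySem.Set.empty
  simp only [List.nil_append, List.length_nil, Int.natCast_zero] at this
  unfold pvA_dedup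
  rw [this]


lemma pvDedup_length (seen : PySem.Set Int) (l : List (Option Int)) :
    (pvDedup seen l).2.length = l.length := by
  induction l generalizing seen with
  | nil => simp [pvDedup]
  | cons x t ih =>
    match x with
    | none => simp [pvDedup, ih]
    | some v =>
      by_cases hc : v ≤ 0 ∨ v ∈ seen <;> simp [pvDedup, hc, ih]


lemma pvAll_pvDedup : ∀ (l : List (Option Int)) (seen : PySem.Set Int) (s : Int),
    pvAll s (pvDedup seen l).2 = pvKp seen s l := by
  intro l
  induction l with
  | nil => intro seen s; simp [pvDedup, pvAll, pvKp]
  | cons x t ih =>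
    intro seen s
    match x with
    | none => simp [pvDedup, pvAll, pvKp, ih]
    | some v =>
      by_cases hc : v ≤ 0 ∨ v ∈ seen <;> simp [pvDedup, pvAll, pvKp, hc, ih]


lemma pvB_known_go : ∀ (l : List (Option Int)) (seen : PySem.Set Int) (acc : List (Int × Int)) (s : Int),
    ((PySem.List.enumerate l s).foldl
      (fun (st : PySem.Set Int × List (Int × Int)) p =>
        match p.2 with
        | some r => if 0 < r ∧ ¬ st.1.contains r then (st.1.add r, st.2 ++ [(p.1, r)]) else st
        | none => st)
      (seen, acc)).2 = acc ++ pvKp seen s l := by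
  intro l
  induction l with
  | nil => intro seen acc s; simp [pvKp, PySem.List.enumerate_nil]
  | cons x t ih =>
    intro seen acc s
    rw [PySem.List.enumerate_cons, List.foldl_cons]
    match x with
    | none => simp only [pvKp]; exact ih seen acc (s+1)
    | some v =>
      dsimp only
      by_cases hc : 0 < v ∧ ¬ seen.contains v = true
      · rw [if_pos hc]
        rw [ih (seen.add v) (acc ++ [(s, v)]) (s+1)]
        have hnc : ¬ (v ≤ 0 ∨ v ∈ seen) := by
          push_neg
          exact ⟨by omega, by simpa using hc.2⟩
        simp [pvKp, hnc]
      · rw [if_neg hc]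
        rw [ih seen acc (s+1)]
        have hc' : v ≤ 0 ∨ v ∈ seen := by
          by_contra hn
          push_neg at hn
          refine hc ⟨by omega, by simpa using hn.2⟩
        simp [pvKp, hc']


lemma pvB_known_eq (l : List (Option Int)) : pvB_known l = pvKp PySem.Set.empty 0 l := by
  unfold pvB_known
  rw [pvB_known_go l PySem.Set.empty [] 0]
  simp


-- the two extraction loops of A
lemma pvExtract_go : ∀ (l : List (Option Int)) (s : Int) (acc : List (Int × Int)),
    (PySem.List.enumerate l s).foldl
      (fun acc p => match p.2 with | some r => acc ++ [(p.1, r)] | none => acc) acc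
    = acc ++ pvAll s l := by
  intro l
  induction l with
  | nil => intro s acc; simp [pvAll, PySem.List.enumerate_nil]
  | cons x t ih =>
    intro s acc
    rw [PySem.List.enumerate_cons, List.foldl_cons]
    match x with
    | none => simp only [pvAll]; exact ih (s+1) acc
    | some v => simp only [pvAll]; rw [ih (s+1) (acc ++ [(s, v)])]; simp


lemma pvIndices_go : ∀ (l : List (Option Int)) (s : Int) (acc : List Int),
    (PySem.List.enumerate l s).foldl
      (fun acc p => if p.2.isSome then acc ++ [p.1] else acc) acc
    = acc ++ (pvAll s l).map (·.1) := by
  intro l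
  induction l with
  | nil => intro s acc; simp [pvAll, PySem.List.enumerate_nil]
  | cons x t ih =>
    intro s acc
    rw [PySem.List.enumerate_cons, List.foldl_cons]
    match x with
    | none => simp only [pvAll]; simpa using ih (s+1) acc
    | some v =>
      simp only [pvAll]
      have := ih (s+1) (acc ++ [s])
      simp only [Option.isSome_some, if_pos] at this ⊢
      rw [this]
      simp


-- structure of pvAll / pvKp

lemma pvAll_bounds : ∀ (l : List (Option Int)) (s : Int) (p : Int × Int),
    p ∈ pvAll s l → s ≤ p.1 ∧ p.1 < s + l.length := by
  intro l
  induction l with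
  | nil => intro s p hp; simp [pvAll] at hp
  | cons x t ih =>
    intro s p hp
    match x with
    | none =>
      have := ih (s+1) p (by simpa [pvAll] using hp)
      constructor <;> [omega; (simp only [List.length_cons]; push_cast; omega)]
    | some v =>
      simp only [pvAll, List.mem_cons] at hp
      rcases hp with h | h
      · subst h; constructor <;> [omega; (simp only [List.length_cons]; push_cast; omega)]
      · have := ih (s+1) p h
        constructor <;> [omega; (simp only [List.length_cons]; push_cast; omega)]


lemma pvAll_pairwise : ∀ (l : List (Option Int)) (s : Int),
    (pvAll s l).Pairwise (fun p q => p.1 < q.1) := by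
  intro l
  induction l with
  | nil => intro s; simp [pvAll]
  | cons x t ih =>
    intro s
    match x with
    | none => simpa [pvAll] using ih (s+1)
    | some v =>
      simp only [pvAll]
      refine List.Pairwise.cons ?_ (ih (s+1))
      intro q hq
      have := pvAll_bounds t (s+1) q hq
      simp only
      omega


lemma pvAll_getElem : ∀ (l : List (Option Int)) (s : Int) (p : Int × Int),
    p ∈ pvAll s l → l[(p.1 - s).toNat]? = some (some p.2) := by
  intro l
  induction l with
  | nil => intro s p hp; simp [pvAll] at hp
  | cons x t ih =>
    intro s p hp
    match x with
    | none =>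
      have hb := pvAll_bounds t (s+1) p (by simpa [pvAll] using hp)
      have := ih (s+1) p (by simpa [pvAll] using hp)
      have hk : (p.1 - s).toNat = (p.1 - (s+1)).toNat + 1 := by omega
      rw [hk]
      simpa using this
    | some v =>
      simp only [pvAll, List.mem_cons] at hp
      rcases hp with h | h
      · subst h; simp
      · have hb := pvAll_bounds t (s+1) p h
        have := ih (s+1) p h
        have hk : (p.1 - s).toNat = (p.1 - (s+1)).toNat + 1 := by omega
        rw [hk]
        simpa using this



-- the drop fold of A = pvDropF
lemma pvDrop_go : ∀ (l pre : List (Option Int)) (a : Int × Int),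
    (pvAll (pre.length : Int) l).foldl
      (fun rs p => if 1 < |p.2 - (a.2 + (p.1 - a.1))| then PySem.List.pySetD rs p.1 none else rs)
      (pre ++ l)
    = pre ++ pvDropF a pre.length l := by
  intro l
  induction l with
  | nil => intro pre a; simp [pvAll, pvDropF]
  | cons x t ih =>
    intro pre a
    match x with
    | none =>
      simp only [pvAll, pvDropF]
      have h1 : ((pre.length : Int) + 1) = (((pre ++ [(none : Option Int)]).length : Int)) := by simp
      have := ih (pre ++ [(none : Option Int)]) a
      simp only [List.append_assoc, List.singleton_append] at this ⊢
      rw [h1, this]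
    | some v =>
      simp only [pvAll, pvDropF, List.foldl_cons]
      by_cases hc : 1 < |v - (a.2 + ((pre.length : Int) - a.1))|
      · rw [if_pos hc, if_pos hc]
        have hset : PySem.List.pySetD (pre ++ some v :: t) (pre.length : Int) none = pre ++ none :: t := by simp
        rw [hset]
        have h1 : ((pre.length : Int) + 1) = (((pre ++ [(none : Option Int)]).length : Int)) := by simp
        have := ih (pre ++ [(none : Option Int)]) a
        simp only [List.append_assoc, List.singleton_append] at this ⊢
        rw [h1, this]
      · rw [if_neg hc, if_neg hc]
        have h1 : ((pre.length : Int) + 1) = (((pre ++ [some v]).length : Int)) := by simp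
        have := ih (pre ++ [some v]) a
        simp only [List.append_assoc, List.singleton_append] at this ⊢
        rw [h1, this]


lemma pvDropF_length (a : Int × Int) : ∀ (s : Int) (l : List (Option Int)),
    (pvDropF a s l).length = l.length := by
  intro s l
  induction l generalizing s with
  | nil => simp [pvDropF]
  | cons x t ih =>
    match x with
    | none => simp [pvDropF, ih]
    | some v => simp [pvDropF, ih]


lemma pvAll_pvDropF (a : Int × Int) : ∀ (l : List (Option Int)) (s : Int),
    pvAll s (pvDropF a s l) = (pvAll s l).filter (fun p => |p.2 - ((a.2 - a.1) + p.1)| ≤ 1) := by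
  intro l
  induction l with
  | nil => intro s; simp [pvAll, pvDropF]
  | cons x t ih =>
    intro s
    match x with
    | none => simp only [pvAll, pvDropF]; exact ih (s+1)
    | some v =>
      simp only [pvAll, pvDropF]
      have harg : v - (a.2 + (s - a.1)) = v - ((a.2 - a.1) + s) := by ring
      by_cases hc : 1 < |v - (a.2 + (s - a.1))|
      · rw [if_pos hc]
        have : ¬ |v - ((a.2 - a.1) + s)| ≤ 1 := by rw [← harg]; omega
        simp only [pvAll, List.filter_cons]
        simp [this, ih (s+1)]
      · rw [if_neg hc]
        have : |v - ((a.2 - a.1) + s)| ≤ 1 := by rw [← harg]; omega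
        simp only [pvAll, List.filter_cons]
        simp [this, ih (s+1)]


-- generic characterisation of a fold of in-range pySetD writes
lemma pvSetFold_length {α : Type} (g : Int → α) : ∀ (js : List Int) (rs : List α),
    (js.foldl (fun acc j => PySem.List.pySetD acc j (g j)) rs).length = rs.length := by
  intro js
  induction js with
  | nil => intro rs; simp
  | cons j t ih => intro rs; rw [List.foldl_cons, ih]; simp [PySem.List.length_pySetD]


lemma pvSetFold_getElem {α : Type} (g : Int → α) : ∀ (js : List Int) (rs : List α)
    (_ : ∀ j ∈ js, 0 ≤ j ∧ j < (rs.length : Int)) (k : Nat) (_ : k < rs.length),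
    (js.foldl (fun acc j => PySem.List.pySetD acc j (g j)) rs)[k]? =
      if (k : Int) ∈ js then some (g k) else rs[k]? := by
  intro js
  induction js with
  | nil => intro rs _ k hk; simp
  | cons j t ih =>
    intro rs hb k hk
    rw [List.foldl_cons]
    have hj := hb j (by simp)
    have hset : PySem.List.pySetD rs j (g j) = rs.set j.toNat (g j) :=
      PySem.List.pySetD_of_nonneg _ _ hj.1
    have hlen : (rs.set j.toNat (g j)).length = rs.length := by simp
    have hb' : ∀ i ∈ t, 0 ≤ i ∧ i < ((rs.set j.toNat (g j)).length : Int) := by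
      intro i hi; rw [hlen]; exact hb i (by simp [hi])
    rw [hset, ih (rs.set j.toNat (g j)) hb' k (by omega)]
    by_cases hmem : (k : Int) ∈ t
    · simp [hmem]
    · rw [if_neg hmem]
      by_cases hkj : (k : Int) = j
      · have hmem2 : (k : Int) ∈ j :: t := by simp [hkj]
        have hkj' : j.toNat = k := by omega
        rw [if_pos hmem2, List.getElem?_set, if_pos hkj']
        have hg : g j = g (k : Int) := by rw [hkj]
        rw [hg, if_pos (show j.toNat < rs.length by omega)]
      · have hmem2 : ¬ ((k : Int) ∈ j :: t) := by simp [hkj, hmem]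
        have hkj' : ¬ (j.toNat = k) := by omega
        rw [if_neg hmem2, List.getElem?_set, if_neg hkj']


-- anchor facts
lemma pvAnchor_shift (q : Int × Int) (t : List (Int × Int)) (cur : Int × Int) (i : Int)
    (h : q.1 ≤ i) : pvAnchor cur (q :: t) i = pvAnchor q t i := by
  simp [pvAnchor, h]


lemma pvHead_le_last : ∀ (t : List (Int × Int)) (q : Int × Int),
    (q :: t).Pairwise (fun p r => p.1 < r.1) → q.1 ≤ ((q :: t).getLast (by simp)).1 := by
  intro t
  induction t with
  | nil => intro q _; simp
  | cons y s ih =>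
    intro q hpw
    have h1 : q.1 < y.1 := (List.pairwise_cons.mp hpw).1 y (by simp)
    have h2 := ih y (List.pairwise_cons.mp hpw).2
    rw [List.getLast_cons (by simp)]
    omega

lemma pvAnchor_last : ∀ (rest : List (Int × Int)) (cur : Int × Int) (i : Int),
    ((cur :: rest).Pairwise (fun p q => p.1 < q.1)) →
    ((cur :: rest).getLast (by simp)).1 ≤ i →
    pvAnchor cur rest i = (cur :: rest).getLast (by simp) := by
  intro rest
  induction rest with
  | nil => intro cur i _ _; simp [pvAnchor]
  | cons q t ih =>
    intro cur i hpw hle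
    rw [List.getLast_cons (by simp)] at hle ⊢
    have hq : q.1 ≤ i := by
      have := pvHead_le_last t q (List.pairwise_cons.mp hpw).2
      omega
    rw [pvAnchor_shift q t cur i hq]
    exact ih q i (List.pairwise_cons.mp hpw).2 hle

lemma pvAnchor_stop (cur : Int × Int) (rest : List (Int × Int)) (i : Int)
    (h : ∀ q ∈ rest, i < q.1) : pvAnchor cur rest i = cur := by
  match rest with
  | [] => rfl
  | q :: t =>
    have := h q (by simp)
    simp [pvAnchor]
    omega


-- B's single fill pass produces the specification values
lemma pvBFill_go (c0 : Int × Int) : ∀ (m : Nat) (n i : Int) (res : List Int)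
    (cur : Int × Int) (nxt : List (Int × Int)),
    (n - i).toNat = m →
    (∀ q ∈ nxt, i ≤ q.1) → ((cur :: nxt).Pairwise (fun p q => p.1 < q.1)) → c0.1 ≤ cur.1 →
    ((PySem.List.pyRange i n 1).foldl
      (fun (st : List Int × (Int × Int) × List (Int × Int)) j =>
        if j < c0.1 then (st.1 ++ [max 1 (c0.2 - (c0.1 - j))], st.2)
        else
          match st.2.2 with
          | q :: rest' =>
            if q.1 = j then (st.1 ++ [q.2 + (j - q.1)], q, rest')
            else (st.1 ++ [st.2.1.2 + (j - st.2.1.1)], st.2)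
          | [] => (st.1 ++ [st.2.1.2 + (j - st.2.1.1)], st.2))
      (res, cur, nxt)).1
    = res ++ (PySem.List.pyRange i n 1).map (fun j =>
        if j < c0.1 then max 1 (c0.2 - (c0.1 - j))
        else (pvAnchor cur nxt j).2 + (j - (pvAnchor cur nxt j).1)) := by
  intro m
  induction m with
  | zero =>
    intro n i res cur nxt hm h1 h2 h3
    have hni : n ≤ i := by omega
    rw [PySem.List.pyRange_one_eq_nil hni]
    simp
  | succ m ih =>
    intro n i res cur nxt hm h1 h2 h3
    have hin : i < n := by omega
    rw [PySem.List.pyRange_one_cons hin, List.foldl_cons, List.map_cons]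
    have hm' : (n - (i + 1)).toNat = m := by omega
    by_cases hif : i < c0.1
    · dsimp only
      rw [if_pos hif, if_pos hif]
      have h1' : ∀ q ∈ nxt, i + 1 ≤ q.1 := by
        intro q hq
        have := (List.pairwise_cons.mp h2).1 q hq
        omega
      rw [ih n (i+1) (res ++ [max 1 (c0.2 - (c0.1 - i))]) cur nxt hm' h1' h2 h3]
      simp
    · dsimp only
      rw [if_neg hif, if_neg hif]
      match nxt, h1, h2 with
      | [], h1, h2 =>
        dsimp only
        rw [ih n (i+1) (res ++ [cur.2 + (i - cur.1)]) cur [] hm' (by simp) h2 h3]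
        simp [pvAnchor]
      | q :: rest', h1, h2 =>
        dsimp only
        by_cases hq : q.1 = i
        · rw [if_pos hq]
          have hpw' : (q :: rest').Pairwise (fun p r => p.1 < r.1) := (List.pairwise_cons.mp h2).2
          have h1' : ∀ z ∈ rest', i + 1 ≤ z.1 := by
            intro z hz
            have := (List.pairwise_cons.mp hpw').1 z hz
            omega
          have h3' : c0.1 ≤ q.1 := by
            have := (List.pairwise_cons.mp h2).1 q (by simp)
            omega
          rw [ih n (i+1) (res ++ [q.2 + (i - q.1)]) q rest' hm' h1' hpw' h3']
          have hanch : pvAnchor cur (q :: rest') i = q := by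
            rw [pvAnchor_shift q rest' cur i (by omega)]
            exact pvAnchor_stop q rest' i (fun z hz => by
              have := (List.pairwise_cons.mp hpw').1 z hz; omega)
          have hmap : (PySem.List.pyRange (i+1) n 1).map (fun j =>
                if j < c0.1 then max 1 (c0.2 - (c0.1 - j))
                else (pvAnchor q rest' j).2 + (j - (pvAnchor q rest' j).1))
              = (PySem.List.pyRange (i+1) n 1).map (fun j =>
                if j < c0.1 then max 1 (c0.2 - (c0.1 - j))
                else (pvAnchor cur (q :: rest') j).2 + (j - (pvAnchor cur (q :: rest') j).1)) := by
            apply List.map_congr_left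
            intro j hj
            rw [PySem.List.mem_pyRange_one] at hj
            rw [pvAnchor_shift q rest' cur j (by omega)]
          rw [hmap, hanch]
          simp
        · rw [if_neg hq]
          have hiq : i < q.1 := by
            have := h1 q (by simp)
            omega
          have h1' : ∀ z ∈ q :: rest', i + 1 ≤ z.1 := by
            intro z hz
            rcases List.mem_cons.mp hz with h | h
            · subst h; omega
            · have hpw' : (q :: rest').Pairwise (fun p r => p.1 < r.1) := (List.pairwise_cons.mp h2).2
              have := (List.pairwise_cons.mp hpw').1 z h
              omega
          rw [ih n (i+1) (res ++ [cur.2 + (i - cur.1)]) cur (q :: rest') hm' h1' h2 h3]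
          have hanch : pvAnchor cur (q :: rest') i = cur := by
            simp only [pvAnchor]
            rw [if_neg (by omega)]
          rw [hanch]
          simp


-- A's final rebuild loop on an all-some list is a map
lemma pvFinal_go : ∀ (l : List (Option Int)) (s : Int) (acc : List Int),
    (∀ x ∈ l, x ≠ none) →
    (PySem.List.enumerate l s).foldl
      (fun res p =>
        match p.2 with
        | some r => res ++ [r]
        | none => res ++ [if res = [] then p.1 + 1 else PySem.List.pyGetD res (-1) 0 + 1]) acc
    = acc ++ l.map (fun o => o.getD 0) := by
  intro l
  induction l with
  | nil => intro s acc h; simp [PySem.List.enumerate_nil]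
  | cons x t ih =>
    intro s acc h
    rw [PySem.List.enumerate_cons, List.foldl_cons]
    match x with
    | none => exact absurd rfl (h none (by simp))
    | some v =>
      dsimp only
      rw [ih (s+1) (acc ++ [v]) (fun y hy => h y (by simp [hy]))]
      simp


-- min2? on a list whose first key strictly increases is the head
lemma pvMin2_head (t : List (Int × Int)) (x : Int × Int)
    (h : ∀ y ∈ t, x.1 < y.1) :
    PySem.List.min2? (x :: t) (fun p => p.1) (fun p => p.2) = some x := by
  unfold PySem.List.min2?
  rw [List.foldl_cons]
  dsimp only
  induction t with
  | nil => rfl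
  | cons y t ih =>
    rw [List.foldl_cons]
    have hy := h y (by simp)
    have h1 : ¬ (y.1 < x.1) := by omega
    have hcond : (decide (y.1 < x.1) || !decide (x.1 < y.1) && decide (y.2 < x.2)) = false := by
      simp [h1, hy]
    dsimp only
    rw [hcond]
    simp only [Bool.false_eq_true, if_false]
    exact ih (fun z hz => h z (by simp [hz]))


-- the counting identity behind the freq-table support
lemma pvCount_window : ∀ (l : List Int) (d0 : Int),
    (l.countP (fun x => decide (|x - d0| ≤ 1)) : Int)
      = (l.count (d0 - 1) : Int) + (l.count d0 : Int) + (l.count (d0 + 1) : Int) := by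
  intro l d0
  induction l with
  | nil => simp
  | cons x t ih =>
    have hiff : |x - d0| ≤ 1 ↔ (x = d0 - 1 ∨ x = d0 ∨ x = d0 + 1) := by
      rw [abs_le]; omega
    simp only [List.countP_cons, List.count_cons, beq_iff_eq, decide_eq_true_eq]
    push_cast
    rw [ih]
    by_cases h1 : x = d0 - 1
    · subst h1
      rw [if_pos (by rw [hiff]; tauto), if_pos rfl, if_neg (by omega), if_neg (by omega)]
      ring
    · by_cases h2 : x = d0
      · subst h2
        rw [if_pos (by rw [hiff]; tauto), if_neg (by omega), if_pos rfl, if_neg (by omega)]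
        ring
      · by_cases h3 : x = d0 + 1
        · subst h3
          rw [if_pos (by rw [hiff]; tauto), if_neg (by omega), if_neg (by omega), if_pos rfl]
          ring
        · rw [if_neg (by rw [hiff]; tauto), if_neg h1, if_neg h2, if_neg h3]
          ring


-- A's pairwise support = B's frequency-table support
lemma pvSupport_eq (K : List (Int × Int)) (a : Int × Int) :
    pvA_support K a.1 a.2
      = pvB_supp (K.foldl (fun d p => d.insert (p.2 - p.1) (d.getD (p.2 - p.1) 0 + 1))
          PySem.Dict.empty) (a.2 - a.1) := by
  unfold pvA_support pvB_supp
  have hfold : (K.foldl (fun d p => d.insert (p.2 - p.1) (d.getD (p.2 - p.1) 0 + 1)) PySem.Dict.empty : PySem.Dict Int Int)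
      = ((K.map (fun p => p.2 - p.1)).foldl (fun d x => d.insert x (d.getD x 0 + 1)) PySem.Dict.empty : PySem.Dict Int Int) := by
    rw [List.foldl_map]
  rw [hfold]
  rw [PySem.Dict.getD_foldl_insert_add_one, PySem.Dict.getD_foldl_insert_add_one,
    PySem.Dict.getD_foldl_insert_add_one]
  simp only [PySem.Dict.getD_empty, zero_add]
  rw [PySem.List.foldl_ite_add_one (fun q => |q.2 - (a.2 + (q.1 - a.1))| ≤ 1) K 0]
  have hcp : K.countP (fun q => decide (|q.2 - (a.2 + (q.1 - a.1))| ≤ 1))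
      = (K.map (fun p => p.2 - p.1)).countP (fun x => decide (|x - (a.2 - a.1)| ≤ 1)) := by
    rw [List.countP_map]
    apply List.countP_congr
    intro q _
    have harg : q.2 - (a.2 + (q.1 - a.1)) = (q.2 - q.1) - (a.2 - a.1) := by ring
    simp only [Function.comp_apply, decide_eq_true_eq, harg]
  rw [hcp, ← pvCount_window ((K.map (fun p => p.2 - p.1))) (a.2 - a.1)]
  omega

-- A's drop helper = pvDropF with the shared best anchor
lemma pvA_drop_eq (l : List (Option Int)) (K : List (Int × Int))
    (hK : pvAll 0 l = K) (h2 : ¬ K.length ≤ 1) :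
    pvA_drop l = pvDropF (pvBest K) 0 l := by
  have hpwK : K.Pairwise (fun p q => p.1 < q.1) := by
    rw [← hK]; exact pvAll_pairwise l 0
  have hnd : K.Nodup := by
    refine List.Pairwise.imp ?_ hpwK
    intro p q h he
    rw [he] at h
    omega
  simp only [pvA_drop]
  rw [pvExtract_go l 0 [], List.nil_append, hK, if_neg h2]
  set S := K.foldl (fun d p => d.insert p (pvA_support K p.1 p.2)) PySem.Dict.empty with hS
  have hitems : S.items = K.map (fun p => (p, pvA_support K p.1 p.2)) := by
    rw [hS, PySem.Dict.items_foldl_insert_fresh K (fun p => p) (fun p => pvA_support K p.1 p.2)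
      PySem.Dict.empty (fun a _ => PySem.Dict.contains_empty a) (by simpa using hnd)]
    rfl
  have hkeys : S.keys.Nodup := by
    rw [hS]
    exact PySem.Dict.nodup_keys_foldl_insert K (fun _ p => pvA_support K p.1 p.2)
      PySem.Dict.empty (by simp [PySem.Dict.keys_empty])
  have hgetD : ∀ p ∈ K, S.getD p 0 = pvA_support K p.1 p.2 := by
    intro p hp
    exact PySem.Dict.getD_of_mem_items S (by rw [hitems]; exact List.mem_map_of_mem hp) hkeys 0
  have hkeysK : S.keys = K := by
    rw [hS, PySem.Dict.keys_foldl_insert K (fun _ p => pvA_support K p.1 p.2) PySem.Dict.empty,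
      PySem.Dict.keys_empty, PySem.Set.update_nil_left, PySem.Set.ofList_eq_self_of_nodup K hnd]
  set freq : PySem.Dict Int Int :=
    K.foldl (fun d p => d.insert (p.2 - p.1) (d.getD (p.2 - p.1) 0 + 1)) PySem.Dict.empty with hfreq
  have hvals : S.values = K.map (fun p => pvB_supp freq (p.2 - p.1)) := by
    rw [PySem.Dict.values_eq_map_keys S hkeys 0, hkeysK]
    apply List.map_congr_left
    intro p hp
    rw [hgetD p hp, pvSupport_eq K p, hfreq]
  rw [hvals]
  set best := (PySem.List.max? (K.map (fun p => pvB_supp freq (p.2 - p.1))) (fun y => y)).getD 0 with hbest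
  have hsupported : K.filter (fun p => S.getD p 0 == best)
      = K.filter (fun p => pvB_supp freq (p.2 - p.1) == best) := by
    apply List.filter_congr
    intro p hp
    rw [hgetD p hp, pvSupport_eq K p, hfreq]
  rw [hsupported]
  set supported := K.filter (fun p => pvB_supp freq (p.2 - p.1) == best) with hsupp
  set large := supported.filter (fun p => 1000 ≤ p.2) with hlarge
  have hKne : K ≠ [] := by
    intro h
    rw [h] at h2
    simp at h2
  have hsne : supported ≠ [] := by
    have hmapne : K.map (fun p => pvB_supp freq (p.2 - p.1)) ≠ [] := by simpa using hKne
    obtain ⟨m, hm⟩ : ∃ m, PySem.List.max? (K.map (fun p => pvB_supp freq (p.2 - p.1))) (fun y => y) = some m := by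
      rcases hmax : PySem.List.max? (K.map (fun p => pvB_supp freq (p.2 - p.1))) (fun y => y) with _ | m
      · exact absurd ((PySem.List.max?_eq_none_iff _ _).mp hmax) hmapne
      · exact ⟨m, hmax⟩
    have hmem := PySem.List.max?_mem hm
    obtain ⟨p, hp, hpm⟩ := List.mem_map.mp hmem
    have hbm : best = m := by rw [hbest, hm]; rfl
    intro hnil
    have hmemsup : p ∈ supported := by
      rw [hsupp, List.mem_filter]
      exact ⟨hp, by simp [hpm, hbm]⟩
    rw [hnil] at hmemsup
    simp at hmemsup
  have hspw : supported.Pairwise (fun p q => p.1 < q.1) := by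
    rw [hsupp]
    exact List.Pairwise.sublist List.filter_sublist hpwK
  have hBest : pvBest K = if large ≠ [] then
        (PySem.List.max2? large (fun p => p.2) (fun p => -p.1)).getD (0, 0)
      else supported.headD (0, 0) := by
    simp only [pvBest]
    rw [← hfreq, ← hbest, ← hsupp, ← hlarge]
  have hXB : (if large ≠ [] then
        (PySem.List.max2? large (fun p => p.2) (fun p => -p.1)).getD (0, 0)
      else (PySem.List.min2? supported (fun p => p.1) (fun p => p.2)).getD (0, 0)) = pvBest K := by
    rw [hBest]
    by_cases hl : large ≠ []
    · rw [if_pos hl, if_pos hl]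
    · rw [if_neg hl, if_neg hl]
      obtain ⟨x, t, hxt⟩ := List.exists_cons_of_ne_nil hsne
      rw [hxt] at hspw ⊢
      rw [pvMin2_head t x (fun y hy => (List.pairwise_cons.mp hspw).1 y hy)]
      rfl
  rw [hXB]
  have hgo := pvDrop_go l [] (pvBest K)
  simp only [List.length_nil, Int.natCast_zero, List.nil_append, hK] at hgo
  rw [hgo]

lemma pvB_filterKnown_eq (K : List (Int × Int)) (h2 : ¬ K.length ≤ 1) :
    pvB_filterKnown K
      = K.filter (fun p => |p.2 - (((pvBest K).2 - (pvBest K).1) + p.1)| ≤ 1) := by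
  unfold pvB_filterKnown pvBest
  rw [if_neg h2]


def pvGapStep (rs : List (Option Int)) (q : Int × Int) : List (Option Int) :=
  let start_rank := (PySem.List.pyGetD rs q.1 none).getD 0
  (PySem.List.pyRange (q.1 + 1) q.2 1).foldl
    (fun rs2 i => PySem.List.pySetD rs2 i (some (start_rank + (i - q.1)))) rs

lemma pvEnumZip (xs : List Int) :
    (PySem.List.enumerate xs.dropLast 0).map (fun p => (p.2, PySem.List.pyGetD xs (p.1 + 1) 0))
      = xs.zip xs.tail := by
  apply List.ext_getElem
  · simp only [List.length_map, PySem.List.length_enumerate, List.length_zip, List.length_tail,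
      List.length_dropLast]
    omega
  · intro k h1 h2
    simp only [List.getElem_map, List.getElem_zip]
    rw [PySem.List.getElem_enumerate xs.dropLast 0 k (by simpa using h1)]
    dsimp only
    have hk : k + 1 < xs.length := by
      simp only [List.length_map, PySem.List.length_enumerate, List.length_dropLast] at h1
      omega
    have hidx : (0 : Int) + (k : Int) + 1 = (((k + 1 : Nat)) : Int) := by push_cast; ring
    rw [hidx, PySem.List.pyGetD_eq_getElem xs 0 (by positivity) (by push_cast; omega)]
    refine Prod.ext ?_ ?_
    · exact List.getElem_dropLast _
    · dsimp only
      rw [List.getElem_tail]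
      simp

lemma pvGapFold : ∀ (rest : List (Int × Int)) (cur : Int × Int) (rs : List (Option Int)),
    (∀ p ∈ cur :: rest, 0 ≤ p.1 ∧ p.1 < (rs.length : Int) ∧ rs[p.1.toNat]? = some (some p.2)) →
    ((cur :: rest).Pairwise (fun p q => p.1 < q.1)) →
    (((((cur :: rest).map (fun p => p.1)).zip (((cur :: rest).map (fun p => p.1)).tail)).foldl pvGapStep rs).length = rs.length
      ∧ ∀ k : Nat, k < rs.length →
      ((((cur :: rest).map (fun p => p.1)).zip (((cur :: rest).map (fun p => p.1)).tail)).foldl pvGapStep rs)[k]? =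
        if cur.1 ≤ (k : Int) ∧ (k : Int) ≤ ((cur :: rest).getLast (by simp)).1
        then some (some ((pvAnchor cur rest (k : Int)).2 + ((k : Int) - (pvAnchor cur rest (k : Int)).1)))
        else rs[k]?) := by
  intro rest
  induction rest with
  | nil =>
    intro cur rs hb _
    refine ⟨by simp, ?_⟩
    intro k hk
    simp only [List.map_cons, List.map_nil, List.tail_cons, List.zip_nil_right, List.foldl_nil,
      List.getLast_singleton]
    by_cases hc : cur.1 ≤ (k : Int) ∧ (k : Int) ≤ cur.1
    · rw [if_pos hc]
      have hkc : (k : Int) = cur.1 := by omega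
      have hget := (hb cur (by simp)).2.2
      have : cur.1.toNat = k := by omega
      rw [this] at hget
      rw [hget]
      simp only [pvAnchor]
      rw [hkc]
      norm_num
    · rw [if_neg hc]
  | cons q rest' ih =>
    intro cur rs hb hpw
    have hbc := hb cur (by simp)
    have hbq := hb q (by simp)
    have hcq : cur.1 < q.1 := (List.pairwise_cons.mp hpw).1 q (by simp)
    have hpw' : (q :: rest').Pairwise (fun p r => p.1 < r.1) := (List.pairwise_cons.mp hpw).2
    -- the first zip element is (cur.1, q.1); the rest is the zip of (q :: rest')
    have hzip : (((cur :: q :: rest').map (fun p => p.1)).zip (((cur :: q :: rest').map (fun p => p.1)).tail))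
        = (cur.1, q.1) :: ((((q :: rest').map (fun p => p.1)).zip (((q :: rest').map (fun p => p.1)).tail))) := by
      simp [List.zip_cons_cons]
    rw [hzip, List.foldl_cons]
    -- the first gap write
    have hstart : (PySem.List.pyGetD rs cur.1 none).getD 0 = cur.2 := by
      rw [PySem.List.pyGetD_eq_getElem rs none hbc.1 hbc.2.1]
      have := hbc.2.2
      rw [List.getElem?_eq_some_iff] at this
      obtain ⟨hlt, hv⟩ := this
      rw [hv]
      rfl
    have hstep : pvGapStep rs (cur.1, q.1)
        = (PySem.List.pyRange (cur.1 + 1) q.1 1).foldl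
            (fun rs2 i => PySem.List.pySetD rs2 i (some (cur.2 + (i - cur.1)))) rs := by
      simp only [pvGapStep, hstart]
    rw [hstep]
    set rs' := (PySem.List.pyRange (cur.1 + 1) q.1 1).foldl
        (fun rs2 i => PySem.List.pySetD rs2 i (some (cur.2 + (i - cur.1)))) rs with hrs'
    have hlen' : rs'.length = rs.length := pvSetFold_length _ _ _
    have hbnd : ∀ j ∈ PySem.List.pyRange (cur.1 + 1) q.1 1, 0 ≤ j ∧ j < (rs.length : Int) := by
      intro j hj
      rw [PySem.List.mem_pyRange_one] at hj
      constructor <;> omega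
    have hget' : ∀ k : Nat, k < rs.length →
        rs'[k]? = if cur.1 < (k : Int) ∧ (k : Int) < q.1
          then some (some (cur.2 + ((k : Int) - cur.1))) else rs[k]? := by
      intro k hk
      rw [hrs', pvSetFold_getElem _ _ rs hbnd k hk]
      by_cases hmem : (k : Int) ∈ PySem.List.pyRange (cur.1 + 1) q.1 1
      · rw [if_pos hmem]
        rw [PySem.List.mem_pyRange_one] at hmem
        rw [if_pos (by omega)]
      · rw [if_neg hmem]
        rw [PySem.List.mem_pyRange_one] at hmem
        rw [if_neg (by omega)]
    have hb' : ∀ p ∈ q :: rest', 0 ≤ p.1 ∧ p.1 < (rs'.length : Int) ∧ rs'[p.1.toNat]? = some (some p.2) := by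
      intro p hp
      have hbp := hb p (by simp [hp])
      have hple : q.1 ≤ p.1 := by
        rcases List.mem_cons.mp hp with h | h
        · rw [h]
        · have := (List.pairwise_cons.mp hpw').1 p h
          omega
      refine ⟨hbp.1, by rw [hlen']; exact hbp.2.1, ?_⟩
      rw [hget' p.1.toNat (by omega)]
      rw [if_neg (by omega)]
      exact hbp.2.2
    obtain ⟨ihlen, ihget⟩ := ih q rs' hb' hpw'
    refine ⟨by rw [ihlen, hlen'], ?_⟩
    intro k hk
    rw [ihget k (by omega)]
    have hlast : ((cur :: q :: rest').getLast (by simp)) = ((q :: rest').getLast (by simp)) := by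
      rw [List.getLast_cons (by simp)]
    have hql : q.1 ≤ ((q :: rest').getLast (by simp)).1 := pvHead_le_last rest' q hpw'
    rw [hlast]
    by_cases h1 : q.1 ≤ (k : Int) ∧ (k : Int) ≤ ((q :: rest').getLast (by simp)).1
    · rw [if_pos h1, if_pos (by omega)]
      rw [pvAnchor_shift q rest' cur (k : Int) (by omega)]
    · rw [if_neg h1]
      by_cases h2 : cur.1 ≤ (k : Int) ∧ (k : Int) ≤ ((q :: rest').getLast (by simp)).1
      · -- cur.1 ≤ k < q.1 : covered by the first gap write (or the anchor position itself)
        rw [if_pos h2]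
        have hklt : (k : Int) < q.1 := by omega
        rw [hget' k hk]
        have hanch : pvAnchor cur (q :: rest') (k : Int) = cur := by
          simp only [pvAnchor]
          rw [if_neg (by omega)]
        rw [hanch]
        by_cases h3 : cur.1 < (k : Int)
        · rw [if_pos (by omega)]
        · have hkc : (k : Int) = cur.1 := by omega
          rw [if_neg (by omega)]
          have hget := hbc.2.2
          have htn : cur.1.toNat = k := by omega
          rw [htn] at hget
          rw [hget]
          have : cur.2 + ((k : Int) - cur.1) = cur.2 := by omega
          rw [this]
      · rw [if_neg h2]
        rw [hget' k hk]
        rw [if_neg (by omega)]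

lemma pvRange_shift (n : Int) :
    (PySem.List.pyRange 0 n 1).map (fun i => i + 1) = PySem.List.pyRange 1 (n + 1) 1 := by
  rw [PySem.List.pyRange_one 0 n, PySem.List.pyRange_one 1 (n+1)]
  rw [List.map_map]
  have hn : (n - 0).toNat = (n + 1 - 1).toNat := by omega
  rw [hn]
  apply List.map_congr_left
  intro k _
  simp
  omega


-- B's fill pass produces the pointwise specification
lemma pvB_fill_eq (n : Int) (c0 : Int × Int) (rest : List (Int × Int))
    (h1 : ∀ q ∈ rest, 0 ≤ q.1)
    (h2 : (c0 :: rest).Pairwise (fun p q => p.1 < q.1)) :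
    pvB_fill n c0 rest = (PySem.List.pyRange 0 n 1).map (fun j => pvSpec c0 rest j) := by
  unfold pvB_fill
  rw [pvBFill_go c0 (n - 0).toNat n 0 [] c0 rest rfl h1 h2 (le_refl _)]
  rw [List.nil_append]
  apply List.map_congr_left
  intro j _
  rw [pvSpec]

-- A's fill on a list with no known entries
lemma pvA_fill_empty (l1 : List (Option Int)) (hall : pvAll 0 l1 = []) :
    pvA_fill l1 = (PySem.List.pyRange 0 l1.length 1).map (fun i => i + 1) := by
  unfold pvA_fill
  rw [pvIndices_go l1 0 [], List.nil_append, hall, List.map_nil, if_pos rfl]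

-- A's fill on a list with known entries c0 :: rest
lemma pvA_fill_eq (l1 : List (Option Int)) (c0 : Int × Int) (rest : List (Int × Int))
    (hall : pvAll 0 l1 = c0 :: rest) :
    pvA_fill l1 = (PySem.List.pyRange 0 l1.length 1).map (fun j => pvSpec c0 rest j) := by
  have hpw : (c0 :: rest).Pairwise (fun p q => p.1 < q.1) := by
    rw [← hall]; exact pvAll_pairwise l1 0
  have hbnd : ∀ p ∈ c0 :: rest, 0 ≤ p.1 ∧ p.1 < (l1.length : Int) ∧ l1[p.1.toNat]? = some (some p.2) := by
    intro p hp
    rw [← hall] at hp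
    have hb := pvAll_bounds l1 0 p hp
    have hg := pvAll_getElem l1 0 p hp
    simp only [Int.sub_zero] at hg
    exact ⟨by omega, by omega, hg⟩
  have hbc0 := hbnd c0 (by simp)
  set L := (c0 :: rest).getLast (by simp) with hL
  have hLmem : L ∈ c0 :: rest := List.getLast_mem _
  have hbL := hbnd L hLmem
  have hc0L : c0.1 ≤ L.1 := pvHead_le_last rest c0 hpw
  unfold pvA_fill
  rw [pvIndices_go l1 0 [], List.nil_append, hall]
  set ks := (c0 :: rest).map (fun p => p.1) with hks
  have hkscons : ks = c0.1 :: rest.map (fun p => p.1) := by rw [hks, List.map_cons]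
  have hksne : ks ≠ [] := by rw [hkscons]; simp
  rw [if_neg hksne]
  have hfi : PySem.List.pyGetD ks 0 0 = c0.1 := by
    rw [hkscons]; exact PySem.List.pyGetD_zero_cons _ _ _
  rw [hfi]
  dsimp only
  have hfr : PySem.List.pyGetD l1 c0.1 none = some c0.2 := by
    rw [PySem.List.pyGetD_eq_getElem l1 none hbc0.1 hbc0.2.1]
    have := hbc0.2.2
    rw [List.getElem?_eq_some_iff] at this
    exact this.2
  rw [hfr]
  simp only [Option.getD_some]
  -- prefix loop
  set R2 := (PySem.List.pyRange (c0.1 - 1) (-1) (-1)).foldl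
      (fun rs i => PySem.List.pySetD rs i (some (max 1 (c0.2 - (c0.1 - i))))) l1 with hR2
  have hR2len : R2.length = l1.length := pvSetFold_length _ _ _
  have hpre : ∀ j ∈ PySem.List.pyRange (c0.1 - 1) (-1) (-1), 0 ≤ j ∧ j < (l1.length : Int) := by
    intro j hj
    rw [PySem.List.mem_pyRange_neg_one] at hj
    constructor <;> omega
  have hR2get : ∀ k : Nat, k < l1.length →
      R2[k]? = if (k : Int) < c0.1 then some (some (max 1 (c0.2 - (c0.1 - (k : Int))))) else l1[k]? := by
    intro k hk
    rw [hR2, pvSetFold_getElem _ _ l1 hpre k hk]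
    by_cases hmem : (k : Int) ∈ PySem.List.pyRange (c0.1 - 1) (-1) (-1)
    · rw [if_pos hmem]
      rw [PySem.List.mem_pyRange_neg_one] at hmem
      rw [if_pos (by omega)]
    · rw [if_neg hmem]
      rw [PySem.List.mem_pyRange_neg_one] at hmem
      rw [if_neg (by omega)]
  -- gap loops: convert the enumerate+lookup fold to a fold over adjacent pairs
  have hconv : (PySem.List.enumerate ks.dropLast 0).foldl
      (fun rs p =>
        let end_index := PySem.List.pyGetD ks (p.1 + 1) 0
        let start_rank := (PySem.List.pyGetD rs p.2 none).getD 0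
        (PySem.List.pyRange (p.2 + 1) end_index 1).foldl
          (fun rs2 i => PySem.List.pySetD rs2 i (some (start_rank + (i - p.2)))) rs) R2
      = (ks.zip ks.tail).foldl pvGapStep R2 := by
    rw [← pvEnumZip ks, List.foldl_map]
    rfl
  rw [hconv]
  have hb2 : ∀ p ∈ c0 :: rest, 0 ≤ p.1 ∧ p.1 < (R2.length : Int) ∧ R2[p.1.toNat]? = some (some p.2) := by
    intro p hp
    have hbp := hbnd p hp
    have hge : c0.1 ≤ p.1 := by
      rcases List.mem_cons.mp hp with h | h
      · rw [h]
      · have := (List.pairwise_cons.mp hpw).1 p h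
        omega
    refine ⟨hbp.1, by rw [hR2len]; exact hbp.2.1, ?_⟩
    rw [hR2get p.1.toNat (by omega), if_neg (by omega)]
    exact hbp.2.2
  obtain ⟨hR3len, hR3get⟩ := pvGapFold rest c0 R2 hb2 hpw
  rw [← hks] at hR3len hR3get
  set R3 := (ks.zip ks.tail).foldl pvGapStep R2 with hR3
  have hR3len' : R3.length = l1.length := by rw [hR3len, hR2len]
  -- last anchor
  have h0L : 0 ≤ L.1 := hbL.1
  have hli : PySem.List.pyGetD ks (-1) 0 = L.1 := by
    rw [PySem.List.pyGetD_neg_one ks 0 hksne]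
    exact List.getLast_map hksne
  rw [hli]
  have hlr : PySem.List.pyGetD R3 L.1 none = some L.2 := by
    rw [PySem.List.pyGetD_eq_getElem R3 none hbL.1 (by rw [hR3len']; exact hbL.2.1)]
    have hget := hR3get L.1.toNat (by rw [hR2len]; omega)
    rw [← hL] at hget
    have ht : ((L.1.toNat : Nat) : Int) = L.1 := by omega
    rw [ht] at hget
    rw [if_pos ⟨hc0L, le_refl _⟩] at hget
    rw [pvAnchor_last rest c0 L.1 hpw (by rw [← hL])] at hget
    rw [← hL] at hget
    have hv : L.2 + (L.1 - L.1) = L.2 := by omega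
    rw [hv] at hget
    rw [List.getElem?_eq_some_iff] at hget
    exact hget.2
  rw [hlr]
  simp only [Option.getD_some]
  -- suffix loop
  set R4 := (PySem.List.pyRange (L.1 + 1) (R3.length : Int) 1).foldl
      (fun rs i => PySem.List.pySetD rs i (some (L.2 + (i - L.1)))) R3 with hR4
  have hR4len : R4.length = R3.length := pvSetFold_length _ _ _
  have hsuf : ∀ j ∈ PySem.List.pyRange (L.1 + 1) (R3.length : Int) 1, 0 ≤ j ∧ j < (R3.length : Int) := by
    intro j hj
    rw [PySem.List.mem_pyRange_one] at hj
    constructor <;> omega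
  have hR4get : ∀ k : Nat, k < R3.length →
      R4[k]? = if L.1 < (k : Int) then some (some (L.2 + ((k : Int) - L.1))) else R3[k]? := by
    intro k hk
    rw [hR4, pvSetFold_getElem _ _ R3 hsuf k hk]
    by_cases hmem : (k : Int) ∈ PySem.List.pyRange (L.1 + 1) (R3.length : Int) 1
    · rw [if_pos hmem]
      rw [PySem.List.mem_pyRange_one] at hmem
      rw [if_pos (by omega)]
    · rw [if_neg hmem]
      rw [PySem.List.mem_pyRange_one] at hmem
      rw [if_neg (by omega)]
  -- the filled list is pointwise the specification
  have hfin : ∀ k : Nat, k < R4.length → R4[k]? = some (some (pvSpec c0 rest (k : Int))) := by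
    intro k hk
    have hkl : k < l1.length := by rw [← hR3len', ← hR4len]; exact hk
    rw [hR4get k (by omega)]
    by_cases hk4 : L.1 < (k : Int)
    · rw [if_pos hk4, pvSpec]
      rw [if_neg (by omega), pvAnchor_last rest c0 (k : Int) hpw (by rw [← hL]; omega), ← hL]
    · rw [if_neg hk4]
      rw [hR3get k (by rw [hR2len]; exact hkl)]
      by_cases hk3 : c0.1 ≤ (k : Int)
      · rw [if_pos (by rw [← hL]; constructor <;> omega), pvSpec, if_neg (by omega)]
      · rw [if_neg (by rw [← hL]; omega)]
        rw [hR2get k hkl, if_pos (by omega), pvSpec, if_pos (by omega)]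
  have hnone : ∀ x ∈ R4, x ≠ none := by
    intro x hx hxn
    rw [List.mem_iff_getElem?] at hx
    obtain ⟨k, hk⟩ := hx
    have hklt : k < R4.length := by
      by_contra hge
      rw [List.getElem?_eq_none (by omega)] at hk
      simp at hk
    rw [hfin k hklt, hxn] at hk
    simp at hk
  rw [pvFinal_go R4 0 [] hnone, List.nil_append]
  -- both sides are maps; compare pointwise
  apply List.ext_getElem
  · simp only [List.length_map, PySem.List.length_pyRange_one]
    rw [hR4len, hR3len']
    omega
  · intro k h1 h2
    simp only [List.getElem_map]
    have hk4 : k < R4.length := by simpa using h1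
    have hget := hfin k hk4
    rw [List.getElem?_eq_some_iff] at hget
    obtain ⟨_, hv⟩ := hget
    rw [hv]
    rw [PySem.List.getElem_pyRange_one 0 (l1.length : Int) k (by simpa using h2)]
    simp

-- ===== VERDICT (by name: the statement is the Claim_ definition above) =====
theorem resolve_anchor_ranks_py_spec : Claim_equal_resolve_anchor_ranks_py := by
  intro det _
  unfold Spec_resolve_anchor_ranks_py
  by_cases hne : det = []
  · rw [hne]
    rfl
  · unfold resolve_anchor_ranks_py resolve_anchor_ranks_py_alt
    rw [if_neg hne, if_neg hne]
    rw [pvA_dedup_eq det, pvB_known_eq det]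
    have hK0 : pvAll 0 (pvDedup PySem.Set.empty det).2 = pvKp PySem.Set.empty 0 det :=
      pvAll_pvDedup det PySem.Set.empty 0
    set l0 := (pvDedup PySem.Set.empty det).2 with hl0
    set K := pvKp PySem.Set.empty 0 det with hKd
    have hlen0 : l0.length = det.length := pvDedup_length _ _
    obtain ⟨l1, hl1A, hl1all, hl1len⟩ :
        ∃ l1, pvA_drop l0 = l1 ∧ pvAll 0 l1 = pvB_filterKnown K ∧ l1.length = det.length := by
      by_cases h2 : K.length ≤ 1
      · refine ⟨l0, ?_, ?_, hlen0⟩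
        · unfold pvA_drop
          rw [pvExtract_go l0 0 [], List.nil_append, hK0, if_pos h2]
        · rw [hK0]
          unfold pvB_filterKnown
          rw [if_pos h2]
      · refine ⟨pvDropF (pvBest K) 0 l0, pvA_drop_eq l0 K hK0 h2, ?_, ?_⟩
        · rw [pvAll_pvDropF (pvBest K) l0 0, hK0, pvB_filterKnown_eq K h2]
        · rw [pvDropF_length]
          exact hlen0
    rw [hl1A]
    cases hc : pvB_filterKnown K with
    | nil =>
      rw [hc] at hl1all
      rw [pvA_fill_empty l1 hl1all, hl1len, pvRange_shift]
    | cons c0 rest =>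
      rw [hc] at hl1all
      have hpw : (c0 :: rest).Pairwise (fun p q => p.1 < q.1) := by
        rw [← hl1all]
        exact pvAll_pairwise l1 0
      have h0 : ∀ q ∈ rest, 0 ≤ q.1 := by
        intro q hq
        have := pvAll_bounds l1 0 q (by rw [hl1all]; simp [hq])
        omega
      rw [pvA_fill_eq l1 c0 rest hl1all, hl1len]
      dsimp only
      rw [pvB_fill_eq (det.length : Int) c0 rest h0 hpw]
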